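-- pv_equiv track=rewrite | github.com/ernanhughes/stephanie | stephanie/tools/arena_citations.py | _entities_in_text
-- ===== SOURCE A (Python) =====
-- from typing import Any, Dict, List, Optional, Tuple
--
-- def _entities_in_text(text: str, kg_entities: List[Dict[str, Any]]) -> List[str]:
--     out = []
--     t = (text or "").lower()
--     for e in kg_entities or []:
--         name = (e.get("name") or e.get("label") or "").lower()
--         if name and name in t:
--             out.append(e.get("id") or e.get("name"))
--     return out
-- ===== SOURCE B (Python) =====
-- def _entities_in_text(text, kg_entities):
--     t = (text or "").lower()
--     ents = list(kg_entities or [])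
--     names = [(e.get("name") or e.get("label") or "").lower() for e in ents]
--     matched = {n for n in dict.fromkeys(names) if n and n in t}
--     return [e.get("id") or e.get("name") for e, n in zip(ents, names) if n in matched]
-- ===== Notes on version B (the rewrite author's own statement) =====
-- stated objective: alternative
-- what changed: B replaces A's per-entity substring test with two passes: it dedups the resolved names, tests each distinct name against the text once to build a matched-name set, then emits ids by set membership, so duplicate names are scanned only once.
-- outside the precondition, e.g. on _entities_in_text('alpha', [{'label': 'alpha'}]): A returns [None], B returns [None]
import Mathlib
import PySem

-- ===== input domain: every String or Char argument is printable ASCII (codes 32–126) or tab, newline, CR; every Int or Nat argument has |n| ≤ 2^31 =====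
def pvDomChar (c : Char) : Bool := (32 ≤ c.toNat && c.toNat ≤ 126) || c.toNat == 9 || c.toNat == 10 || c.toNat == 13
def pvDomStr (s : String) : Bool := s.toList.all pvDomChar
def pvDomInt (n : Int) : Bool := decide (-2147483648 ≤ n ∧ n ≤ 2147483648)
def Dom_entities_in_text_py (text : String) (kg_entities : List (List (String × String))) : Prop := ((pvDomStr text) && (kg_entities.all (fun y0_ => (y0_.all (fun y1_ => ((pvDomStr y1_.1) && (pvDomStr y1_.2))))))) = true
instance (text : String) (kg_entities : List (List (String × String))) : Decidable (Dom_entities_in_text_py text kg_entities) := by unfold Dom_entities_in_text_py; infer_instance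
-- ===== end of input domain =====

-- ===== PORT A =====
-- B changes the algorithm (dedup + matched-name set instead of a per-entity substring test); objective: alternative.
-- Note: where Python A appends None (entity matched via "label" with no truthy "id"/"name"), the port's .getD ""
-- is unfaithful; exactly those inputs are excluded by Pre_entities_in_text_py.
-- Python's 'x or y' on strings/None: first truthy operand.
def pyOrS (a b : Option String) : Option String :=
  match a with
  | some s => if s = "" then b else some s
  | none => b

-- (e.get("name") or e.get("label") or "").lower()
def pvName (e : List (String × String)) : String :=
  PySem.Str.lower ((pyOrS (e.lookup "name") (e.lookup "label")).getD "")

-- e.get("id") or e.get("name")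
def pvIdOpt (e : List (String × String)) : Option String :=
  pyOrS (e.lookup "id") (e.lookup "name")

-- 'text or ""' = text and 'kg_entities or []' = kg_entities under the type convention.
def entities_in_text_py (text : String) (kg_entities : List (List (String × String))) : List String :=
  let t := PySem.Str.lower text
  kg_entities.foldl (fun out e =>
    let name := pvName e
    if !(name == "") && PySem.Str.isIn name t then out ++ [(pvIdOpt e).getD ""] else out) []

-- ===== PORT B =====
def entities_in_text_py_alt (text : String) (kg_entities : List (List (String × String))) : List String :=
  let t := PySem.Str.lower text
  let names := kg_entities.map pvName
  let matched := (PySem.List.dedup names).filter (fun n => !(n == "") && PySem.Str.isIn n t)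
  (kg_entities.zip names).filterMap (fun p =>
    if matched.contains p.2 then some ((pvIdOpt p.1).getD "") else none)

-- ===== PRECONDITION & SPEC =====
-- Pre_ excludes inputs on which Python A returns a list containing None (an entity whose resolved
-- name matches the text but whose "id" and "name" are both missing/empty), i.e. not a value of the
-- declared list-of-str type.
def Pre_entities_in_text_py (text : String) (kg_entities : List (List (String × String))) : Prop :=
  ∀ e ∈ kg_entities,
    (pvName e ≠ "" ∧ PySem.Str.isIn (pvName e) (PySem.Str.lower text) = true) →
    (pvIdOpt e).isSome = true
instance (text : String) (kg_entities : List (List (String × String))) : Decidable (Pre_entities_in_text_py text kg_entities) := by unfold Pre_entities_in_text_py; infer_instance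

def pvWitness_entities_in_text_py : String × (List (List (String × String))) :=
  ("alpha beta", [[("name", "Alpha"), ("id", "e1")], [("label", "zeta"), ("id", "e2")]])

def Spec_entities_in_text_py (text : String) (kg_entities : List (List (String × String))) (out : List String) : Prop := out = entities_in_text_py_alt text kg_entities
instance (text : String) (kg_entities : List (List (String × String))) (out : List String) : Decidable (Spec_entities_in_text_py text kg_entities out) := by unfold Spec_entities_in_text_py; infer_instance

-- ===== CLAIM (what is proved, stated in full; the proofs are below) =====
def Claim_equal_entities_in_text_py : Prop := ∀ (text : String) (kg_entities : List (List (String × String))), Dom_entities_in_text_py text kg_entities → Pre_entities_in_text_py text kg_entities → Spec_entities_in_text_py text kg_entities (entities_in_text_py text kg_entities)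

-- ===== LEMMAS AND PROOFS =====
-- Membership in B's matched set equals A's per-entity test, for any name occurring in the list.
lemma mem_matched (t : String) (names : List String) (n : String) (hn : n ∈ names) :
    ((PySem.List.dedup names).filter (fun m => !(m == "") && PySem.Str.isIn m t)).contains n
      = (!(n == "") && PySem.Str.isIn n t) := by
  have hc : ((PySem.List.dedup names).filter (fun m => !(m == "") && PySem.Str.isIn m t)).contains n = true
      ↔ (!(n == "") && PySem.Str.isIn n t) = true := by
    simp [List.mem_filter, hn]
  exact Bool.coe_iff_coe.mp hc

-- zip-with-its-map then filterMap = filter then map.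
lemma zip_map_filterMap {α β γ : Type} (f : α → β) (q : β → Bool) (g : α → γ) (l : List α) :
    (l.zip (l.map f)).filterMap (fun p => if q p.2 then some (g p.1) else none)
      = (l.filter (fun a => q (f a))).map g := by
  induction l with
  | nil => rfl
  | cons x xs ih =>
      by_cases h : q (f x) = true <;> simp [h, ih]

-- ===== VERDICT (by name: the statement is the Claim_ definition above) =====
theorem entities_in_text_py_spec : Claim_equal_entities_in_text_py := by
  intro text kg_entities _ _
  simp only [Spec_entities_in_text_py, entities_in_text_py, entities_in_text_py_alt]
  rw [zip_map_filterMap pvName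
        (fun n => ((PySem.List.dedup (kg_entities.map pvName)).filter
          (fun m => !(m == "") && PySem.Str.isIn m (PySem.Str.lower text))).contains n)
        (fun e => (pvIdOpt e).getD "") kg_entities,
      PySem.List.foldl_append_if
        (p := fun e => !(pvName e == "") && PySem.Str.isIn (pvName e) (PySem.Str.lower text))
        (f := fun e => (pvIdOpt e).getD ""),
      List.filter_congr (fun e he => mem_matched (PySem.Str.lower text) _ _ (List.mem_map_of_mem he))]
  simp
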